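-- pv_equiv track=rewrite | github.com/aryashah2k/NLP-NLU | app/assignments/a1_word_embeddings/01_skipgram_enhanced.py | create_skipgrams
-- ===== SOURCE A (Python) =====
-- def create_skipgrams(sentence, window_size):
--     skipgrams = []
--     for i in range(len(sentence)):
--         for w in range(-window_size, window_size + 1):
--             context_pos = i + w
--             if context_pos < 0 or context_pos >= len(sentence) or context_pos == i:
--                 continue
--             skipgrams.append((sentence[i], sentence[context_pos]))
--     return skipgrams
-- ===== SOURCE B (Python) =====
-- def create_skipgrams(sentence, window_size):
--     n = len(sentence)
--     lefts = {}
--     rights = {}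
--     for d in range(1, window_size + 1):
--         for i in range(n - d):
--             a, b = sentence[i], sentence[i + d]
--             lefts.setdefault(i + d, []).append((b, a))
--             rights.setdefault(i, []).append((a, b))
--     out = []
--     for i in range(n):
--         out.extend(reversed(lefts.get(i, [])))
--         out.extend(rights.get(i, []))
--     return out
-- ===== Notes on version B (the rewrite author's own statement) =====
-- stated objective: alternative
-- what changed: Distance-staged algorithm: instead of A's per-center offset loop with three-way bounds checks, B makes one aligned pass per offset d=1..window_size over index pairs (i, i+d), filling per-center left/right context buckets in two dicts, then concatenates the buckets (lefts reversed) center by center.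
import Mathlib
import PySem

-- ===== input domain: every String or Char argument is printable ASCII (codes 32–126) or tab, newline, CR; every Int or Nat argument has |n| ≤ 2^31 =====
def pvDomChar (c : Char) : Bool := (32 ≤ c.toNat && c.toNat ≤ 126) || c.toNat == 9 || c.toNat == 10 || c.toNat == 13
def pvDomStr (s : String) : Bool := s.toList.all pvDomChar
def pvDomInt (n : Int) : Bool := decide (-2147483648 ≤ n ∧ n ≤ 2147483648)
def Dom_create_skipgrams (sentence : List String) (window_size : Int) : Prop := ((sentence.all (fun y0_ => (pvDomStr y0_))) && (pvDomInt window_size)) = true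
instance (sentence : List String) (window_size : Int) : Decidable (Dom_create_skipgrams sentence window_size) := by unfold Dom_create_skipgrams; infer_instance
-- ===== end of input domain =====

-- B is a distance-staged alternative: one aligned pass per offset d fills per-center left/right buckets in two dicts, assembled at the end; same cost as A.


-- ===== PORT A =====
def create_skipgrams (sentence : List String) (window_size : Int) : List (String × String) :=
  (PySem.List.pyRange 0 (sentence.length : Int)).foldl (fun skipgrams i =>
    (PySem.List.pyRange (-window_size) (window_size + 1)).foldl (fun sk w =>
      let context_pos := i + w
      if context_pos < 0 ∨ (sentence.length : Int) ≤ context_pos ∨ context_pos = i then sk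
      else sk ++ [(PySem.List.pyGetD sentence i "", PySem.List.pyGetD sentence context_pos "")])
      skipgrams) []

-- ===== PORT B =====
-- Python's `lefts.setdefault(k, []).append(x)` mutates the bucket in place; it is exactly
-- `lefts[k] = lefts.get(k, []) + [x]`, i.e. PySem.Dict.modify k [] (· ++ [x]) — exact.
def create_skipgrams_alt (sentence : List String) (window_size : Int) : List (String × String) :=
  let n : Int := (sentence.length : Int)
  let st :=
    (PySem.List.pyRange 1 (window_size + 1)).foldl (fun st d =>
      (PySem.List.pyRange 0 (n - d)).foldl (fun st i =>
        let a := PySem.List.pyGetD sentence i ""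
        let b := PySem.List.pyGetD sentence (i + d) ""
        (st.1.modify (i + d) [] (· ++ [(b, a)]),
         st.2.modify i [] (· ++ [(a, b)]))) st)
      ((PySem.Dict.empty, PySem.Dict.empty) :
        PySem.Dict Int (List (String × String)) × PySem.Dict Int (List (String × String)))
  (PySem.List.pyRange 0 n).foldl (fun out i =>
      out ++ (st.1.getD i []).reverse ++ st.2.getD i []) []

-- ===== PRECONDITION & SPEC =====
def Spec_create_skipgrams (sentence : List String) (window_size : Int) (out : List (String × String)) : Prop := out = create_skipgrams_alt sentence window_size
instance (sentence : List String) (window_size : Int) (out : List (String × String)) : Decidable (Spec_create_skipgrams sentence window_size out) := by unfold Spec_create_skipgrams; infer_instance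

-- ===== CLAIM (what is proved, stated in full; the proofs are below) =====
def Claim_equal_create_skipgrams : Prop := ∀ (sentence : List String) (window_size : Int), Dom_create_skipgrams sentence window_size → Spec_create_skipgrams sentence window_size (create_skipgrams sentence window_size)

-- ===== LEMMAS AND PROOFS =====

-- sentence[j] (0 ≤ j < len), total form
@[reducible] def sg (s : List String) (j : Int) : String := PySem.List.pyGetD s j ""
-- the left / right context pairs of center i, as contiguous index ranges
def Lc (s : List String) (w i : Int) : List (String × String) :=
  (PySem.List.pyRange (max (i - w) 0) i).map (fun j => (sg s i, sg s j))
def Rc (s : List String) (w i : Int) : List (String × String) :=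
  (PySem.List.pyRange (i + 1) (min (i + w + 1) (s.length : Int))).map (fun j => (sg s i, sg s j))
def canon (s : List String) (w : Int) : List (String × String) :=
  (PySem.List.pyRange 0 (s.length : Int)).flatMap (fun i => Lc s w i ++ Rc s w i)

lemma pyRange_map_add (a b c : Int) :
    (PySem.List.pyRange a b).map (fun x => x + c) = PySem.List.pyRange (a + c) (b + c) := by
  rw [PySem.List.pyRange_one a b, PySem.List.pyRange_one (a+c) (b+c), List.map_map]
  have : b + c - (a + c) = b - a := by ring
  rw [this]
  exact List.map_congr_left (fun k _ => by simp [Function.comp]; ring)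

lemma filter_nonneg_pyRange (a b : Int) (hb : 0 ≤ b) :
    (PySem.List.pyRange a b).filter (fun j => decide (0 ≤ j)) = PySem.List.pyRange (max a 0) b := by
  by_cases ha : 0 ≤ a
  · rw [max_eq_left ha]
    apply List.filter_eq_self.mpr
    intro j hj
    have := (PySem.List.mem_pyRange_one).mp hj
    simp; omega
  · rw [max_eq_right (by omega)]
    rw [PySem.List.pyRange_one_append a 0 b (by omega) hb, List.filter_append]
    have h1 : (PySem.List.pyRange a 0).filter (fun j => decide (0 ≤ j)) = [] := by
      apply List.filter_eq_nil_iff.mpr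
      intro j hj
      have := (PySem.List.mem_pyRange_one).mp hj
      simp; omega
    have h2 : (PySem.List.pyRange 0 b).filter (fun j => decide (0 ≤ j)) = PySem.List.pyRange 0 b := by
      apply List.filter_eq_self.mpr
      intro j hj
      have := (PySem.List.mem_pyRange_one).mp hj
      simp; omega
    rw [h1, h2]; rfl

lemma filter_lt_pyRange (a b n : Int) (han : a ≤ n) :
    (PySem.List.pyRange a b).filter (fun j => decide (j < n)) = PySem.List.pyRange a (min b n) := by
  by_cases hbn : b ≤ n
  · rw [min_eq_left hbn]
    apply List.filter_eq_self.mpr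
    intro j hj
    have := (PySem.List.mem_pyRange_one).mp hj
    simp; omega
  · rw [min_eq_right (by omega)]
    rw [PySem.List.pyRange_one_append a n b han (by omega), List.filter_append]
    have h1 : (PySem.List.pyRange a n).filter (fun j => decide (j < n)) = PySem.List.pyRange a n := by
      apply List.filter_eq_self.mpr
      intro j hj
      have := (PySem.List.mem_pyRange_one).mp hj
      simp; omega
    have h2 : (PySem.List.pyRange n b).filter (fun j => decide (j < n)) = [] := by
      apply List.filter_eq_nil_iff.mpr
      intro j hj
      have := (PySem.List.mem_pyRange_one).mp hj
      simp; omega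
    rw [h1, h2, List.append_nil]

lemma foldl_skip_if {α β : Type} (P : α → Prop) [DecidablePred P] (f : α → β) (l : List α) (acc : List β) :
    l.foldl (fun acc x => if P x then acc else acc ++ [f x]) acc
      = acc ++ (l.filter (fun x => decide ¬ P x)).map f := by
  rw [← PySem.List.foldl_append_if (fun x => decide ¬ P x) f l acc]
  apply PySem.List.foldl_congr_mem
  intro a x _
  by_cases h : P x <;> simp [h]

lemma flatMap_ite_singleton {α β : Type} (l : List α) (p : α → Prop) [DecidablePred p] (g : α → β) :
    l.flatMap (fun x => if p x then [g x] else []) = (l.filter (fun x => decide (p x))).map g := by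
  induction l with
  | nil => rfl
  | cons x xs ih =>
    rw [List.flatMap_cons, List.filter_cons, ih]
    by_cases h : p x <;> simp [h]

lemma filter_beq_pyRange (a b c : Int) :
    (PySem.List.pyRange a b).filter (fun i => i == c) = if a ≤ c ∧ c < b then [c] else [] := by
  by_cases hab : b ≤ a
  · rw [PySem.List.pyRange_one_eq_nil hab]
    rw [if_neg (by omega)]
    rfl
  · rw [not_le] at hab
    rw [PySem.List.pyRange_one_cons hab, List.filter_cons, filter_beq_pyRange (a+1) b c]
    by_cases hac : a = c
    · subst hac
      rw [if_pos (by simp), if_neg (by omega), if_pos (by omega)]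
    · rw [if_neg (by simp [hac])]
      by_cases h : a + 1 ≤ c ∧ c < b
      · rw [if_pos h, if_pos (by omega)]
      · rw [if_neg h, if_neg (by omega)]
termination_by (b - a).toNat
decreasing_by omega

lemma reverse_pyRange_map_sub (a b i : Int) :
    ((PySem.List.pyRange a b).reverse).map (fun d => i - d) = PySem.List.pyRange (i - b + 1) (i - a + 1) := by
  by_cases hab : b ≤ a
  · rw [PySem.List.pyRange_one_eq_nil hab, PySem.List.pyRange_one_eq_nil (by omega)]
    rfl
  · rw [not_le] at hab
    rw [PySem.List.pyRange_one_cons hab, List.reverse_cons, List.map_append,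
        reverse_pyRange_map_sub (a+1) b i]
    have h1 : i - (a + 1) + 1 = i - a := by ring
    rw [h1, List.map_singleton, ← PySem.List.pyRange_one_succ_right (by omega)]
termination_by (b - a).toNat
decreasing_by omega

-- A's inner loop over offsets, for one center i, equals the two context ranges.
lemma core_window (s : List String) (w i : Int) (hi0 : 0 ≤ i) (hin : i < (s.length : Int)) :
    ((PySem.List.pyRange (-w) (w + 1)).filter
        (fun t => decide ¬(i + t < 0 ∨ (s.length : Int) ≤ i + t ∨ i + t = i))).map
      (fun t => (sg s i, sg s (i + t)))
    = Lc s w i ++ Rc s w i := by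
  by_cases hw : w < 0
  · rw [PySem.List.pyRange_one_eq_nil (by omega)]
    unfold Lc Rc
    rw [PySem.List.pyRange_one_eq_nil (by omega), PySem.List.pyRange_one_eq_nil (by omega)]
    rfl
  · rw [not_lt] at hw
    have hshift : PySem.List.pyRange (-w) (w + 1)
        = (PySem.List.pyRange (i - w) (i + w + 1)).map (fun x => x + (-i)) := by
      rw [pyRange_map_add]
      congr 1 <;> ring
    rw [hshift, List.filter_map, List.map_map]
    rw [PySem.List.pyRange_one_append (i - w) i (i + w + 1) (by omega) (by omega),
        PySem.List.pyRange_one_cons (show i < i + w + 1 by omega),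
        List.filter_append, List.filter_cons]
    rw [if_neg (by simp)]
    rw [List.map_append]
    unfold Lc Rc
    congr 1
    · have hfc : (PySem.List.pyRange (i - w) i).filter
          ((fun t => decide ¬(i + t < 0 ∨ (s.length : Int) ≤ i + t ∨ i + t = i)) ∘ (fun x => x + (-i)))
          = (PySem.List.pyRange (i - w) i).filter (fun j => decide (0 ≤ j)) := by
        apply List.filter_congr
        intro j hj
        have hjm := (PySem.List.mem_pyRange_one).mp hj
        simp only [Function.comp_apply]
        rw [decide_eq_decide]
        omega
      rw [hfc, filter_nonneg_pyRange (i - w) i hi0]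
      apply List.map_congr_left
      intro j _
      simp only [Function.comp_apply]
      have : i + (j + -i) = j := by ring
      rw [this]
    · have hfc : (PySem.List.pyRange (i + 1) (i + w + 1)).filter
          ((fun t => decide ¬(i + t < 0 ∨ (s.length : Int) ≤ i + t ∨ i + t = i)) ∘ (fun x => x + (-i)))
          = (PySem.List.pyRange (i + 1) (i + w + 1)).filter (fun j => decide (j < (s.length : Int))) := by
        apply List.filter_congr
        intro j hj
        have hjm := (PySem.List.mem_pyRange_one).mp hj
        simp only [Function.comp_apply]
        rw [decide_eq_decide]
        omega
      rw [hfc, filter_lt_pyRange (i + 1) (i + w + 1) (s.length : Int) (by omega)]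
      apply List.map_congr_left
      intro j _
      simp only [Function.comp_apply]
      have : i + (j + -i) = j := by ring
      rw [this]

lemma A_eq_canon (s : List String) (w : Int) : create_skipgrams s w = canon s w := by
  unfold create_skipgrams canon
  rw [PySem.List.foldl_congr_mem _ _
      (fun acc i => acc ++ ((PySem.List.pyRange (-w) (w + 1)).filter
        (fun t => decide ¬(i + t < 0 ∨ (s.length : Int) ≤ i + t ∨ i + t = i))).map
        (fun t => (sg s i, sg s (i + t)))) _ ?_]
  · rw [PySem.List.foldl_append_eq_flatMap, List.nil_append]
    apply List.flatMap_congr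
    intro i hi
    have him := (PySem.List.mem_pyRange_one).mp hi
    exact core_window s w i him.1 him.2
  · intro acc i _
    exact foldl_skip_if _ _ _ _

-- the flattened (key, pair) streams B's two dicts are built from
def Pleft (s : List String) (w : Int) : List (Int × (String × String)) :=
  (PySem.List.pyRange 1 (w + 1)).flatMap (fun d =>
    (PySem.List.pyRange 0 ((s.length : Int) - d)).map (fun i => (i + d, (sg s (i + d), sg s i))))
def Pright (s : List String) (w : Int) : List (Int × (String × String)) :=
  (PySem.List.pyRange 1 (w + 1)).flatMap (fun d =>
    (PySem.List.pyRange 0 ((s.length : Int) - d)).map (fun i => (i, (sg s i, sg s (i + d)))))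

lemma bucket_filter_left (s : List String) (w j : Int) (hj0 : 0 ≤ j) (hjn : j < (s.length : Int)) :
    ((Pleft s w).filter (fun p => p.1 == j)).map (fun p => p.2)
      = (PySem.List.pyRange 1 (min (w + 1) (j + 1))).map (fun d => (sg s j, sg s (j - d))) := by
  unfold Pleft
  rw [List.filter_flatMap, List.map_flatMap]
  have hstep : ∀ d ∈ PySem.List.pyRange 1 (w + 1),
      (((PySem.List.pyRange 0 ((s.length : Int) - d)).map
          (fun i => (i + d, (sg s (i + d), sg s i)))).filter (fun p => p.1 == j)).map (fun p => p.2)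
        = if d ≤ j then [(sg s j, sg s (j - d))] else [] := by
    intro d hd
    have hdm := (PySem.List.mem_pyRange_one).mp hd
    rw [List.filter_map, List.map_map]
    have hpred : (PySem.List.pyRange 0 ((s.length : Int) - d)).filter
        ((fun p => p.1 == j) ∘ (fun i => (i + d, (sg s (i + d), sg s i))))
        = (PySem.List.pyRange 0 ((s.length : Int) - d)).filter (fun i => i == j - d) := by
      apply List.filter_congr
      intro i _
      simp only [Function.comp_apply]
      rw [Bool.eq_iff_iff, beq_iff_eq, beq_iff_eq]
      omega
    rw [hpred, filter_beq_pyRange]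
    by_cases h : d ≤ j ∧ j < (s.length : Int)
    · rw [if_pos (by omega), if_pos (by omega)]
      simp only [List.map_cons, List.map_nil, Function.comp_apply]
      have : j - d + d = j := by ring
      rw [this]
    · rw [if_neg (by omega), if_neg (by omega)]
      rfl
  rw [List.flatMap_congr hstep,
      flatMap_ite_singleton (PySem.List.pyRange 1 (w + 1)) (fun d => d ≤ j) (fun d => (sg s j, sg s (j - d)))]
  have : (fun d : Int => decide (d ≤ j)) = (fun d : Int => decide (d < j + 1)) := by
    funext d
    rw [decide_eq_decide]
    omega
  rw [this, filter_lt_pyRange 1 (w + 1) (j + 1) (by omega)]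

lemma bucket_filter_right (s : List String) (w j : Int) (hj0 : 0 ≤ j) (hjn : j < (s.length : Int)) :
    ((Pright s w).filter (fun p => p.1 == j)).map (fun p => p.2)
      = (PySem.List.pyRange 1 (min (w + 1) ((s.length : Int) - j))).map (fun d => (sg s j, sg s (j + d))) := by
  unfold Pright
  rw [List.filter_flatMap, List.map_flatMap]
  have hstep : ∀ d ∈ PySem.List.pyRange 1 (w + 1),
      (((PySem.List.pyRange 0 ((s.length : Int) - d)).map
          (fun i => (i, (sg s i, sg s (i + d))))).filter (fun p => p.1 == j)).map (fun p => p.2)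
        = if d < (s.length : Int) - j then [(sg s j, sg s (j + d))] else [] := by
    intro d hd
    have hdm := (PySem.List.mem_pyRange_one).mp hd
    rw [List.filter_map, List.map_map]
    have hpred : (PySem.List.pyRange 0 ((s.length : Int) - d)).filter
        ((fun p => p.1 == j) ∘ (fun i => (i, (sg s i, sg s (i + d)))))
        = (PySem.List.pyRange 0 ((s.length : Int) - d)).filter (fun i => i == j) := by
      apply List.filter_congr
      intro i _
      rfl
    rw [hpred, filter_beq_pyRange]
    by_cases h : j < (s.length : Int) - d
    · rw [if_pos (by omega), if_pos (by omega)]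
      rfl
    · rw [if_neg (by omega), if_neg (by omega)]
      rfl
  rw [List.flatMap_congr hstep,
      flatMap_ite_singleton (PySem.List.pyRange 1 (w + 1)) (fun d => d < (s.length : Int) - j)
        (fun d => (sg s j, sg s (j + d)))]
  rw [filter_lt_pyRange 1 (w + 1) ((s.length : Int) - j) (by omega)]

lemma foldl_pair_modify (s : List String) (d : Int) (l : List Int)
    (p q : PySem.Dict Int (List (String × String))) :
    l.foldl (fun st i =>
        (st.1.modify (i + d) [] (· ++ [(sg s (i + d), sg s i)]),
         st.2.modify i [] (· ++ [(sg s i, sg s (i + d))]))) (p, q)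
      = (l.foldl (fun a i => a.modify (i + d) [] (· ++ [(sg s (i + d), sg s i)])) p,
         l.foldl (fun a i => a.modify i [] (· ++ [(sg s i, sg s (i + d))])) q) := by
  induction l generalizing p q with
  | nil => rfl
  | cons x xs ih =>
    simp only [List.foldl_cons]
    exact ih _ _

lemma B_eq_canon (s : List String) (w : Int) : create_skipgrams_alt s w = canon s w := by
  unfold create_skipgrams_alt
  simp only []
  -- split the pair-state fold into the two dict folds
  have hsplit : (PySem.List.pyRange 1 (w + 1)).foldl (fun st d =>
      (PySem.List.pyRange 0 ((s.length : Int) - d)).foldl (fun st i =>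
        (st.1.modify (i + d) [] (· ++ [(PySem.List.pyGetD s (i + d) "", PySem.List.pyGetD s i "")]),
         st.2.modify i [] (· ++ [(PySem.List.pyGetD s i "", PySem.List.pyGetD s (i + d) "")]))) st)
      ((PySem.Dict.empty, PySem.Dict.empty) :
        PySem.Dict Int (List (String × String)) × PySem.Dict Int (List (String × String)))
    = ((Pleft s w).foldl (fun dct p => dct.modify p.1 [] (· ++ [p.2])) PySem.Dict.empty,
       (Pright s w).foldl (fun dct p => dct.modify p.1 [] (· ++ [p.2])) PySem.Dict.empty) := by
    rw [PySem.List.foldl_congr_mem _ _ (fun st d =>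
        ((PySem.List.pyRange 0 ((s.length : Int) - d)).foldl
            (fun a i => a.modify (i + d) [] (· ++ [(sg s (i + d), sg s i)])) st.1,
         (PySem.List.pyRange 0 ((s.length : Int) - d)).foldl
            (fun a i => a.modify i [] (· ++ [(sg s i, sg s (i + d))])) st.2)) _ ?_]
    · rw [PySem.List.foldl_prod_mk
        (fun (a : PySem.Dict Int (List (String × String))) d =>
          (PySem.List.pyRange 0 ((s.length : Int) - d)).foldl
            (fun a i => a.modify (i + d) [] (· ++ [(sg s (i + d), sg s i)])) a)
        (fun (a : PySem.Dict Int (List (String × String))) d =>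
          (PySem.List.pyRange 0 ((s.length : Int) - d)).foldl
            (fun a i => a.modify i [] (· ++ [(sg s i, sg s (i + d))])) a)]
      unfold Pleft Pright
      rw [List.foldl_flatMap, List.foldl_flatMap]
      congr 1
      · apply PySem.List.foldl_congr_mem
        intro acc d _
        rw [List.foldl_map]
      · apply PySem.List.foldl_congr_mem
        intro acc d _
        rw [List.foldl_map]
    · intro acc d _
      obtain ⟨p, q⟩ := acc
      exact foldl_pair_modify s d _ p q
  rw [hsplit]
  -- assemble: each bucket is a contiguous context range
  rw [PySem.List.foldl_congr_mem _ _ (fun out i => out ++ (Lc s w i ++ Rc s w i)) _ ?_]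
  · rw [PySem.List.foldl_append_eq_flatMap, List.nil_append]
    rfl
  · intro acc i hi
    have him := (PySem.List.mem_pyRange_one).mp hi
    have hL : (((Pleft s w).foldl (fun dct p => dct.modify p.1 [] (· ++ [p.2]))
        (PySem.Dict.empty : PySem.Dict Int (List (String × String)))).getD i []).reverse = Lc s w i := by
      rw [PySem.Dict.getD_foldl_modify_append]
      have hemp : (PySem.Dict.empty : PySem.Dict Int (List (String × String))).getD i [] = [] := by
        simp
      rw [hemp, List.nil_append, bucket_filter_left s w i him.1 him.2]
      have hcomp : (fun d : Int => (sg s i, sg s (i - d)))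
          = (fun t => (sg s i, sg s t)) ∘ (fun d : Int => i - d) := rfl
      rw [hcomp, ← List.map_map, ← List.map_reverse, ← List.map_reverse, reverse_pyRange_map_sub]
      unfold Lc
      congr 2 <;> omega
    have hR : ((Pright s w).foldl (fun dct p => dct.modify p.1 [] (· ++ [p.2]))
        (PySem.Dict.empty : PySem.Dict Int (List (String × String)))).getD i [] = Rc s w i := by
      rw [PySem.Dict.getD_foldl_modify_append]
      have hemp : (PySem.Dict.empty : PySem.Dict Int (List (String × String))).getD i [] = [] := by
        simp
      rw [hemp, List.nil_append, bucket_filter_right s w i him.1 him.2]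
      have hcomp : (fun d : Int => (sg s i, sg s (i + d)))
          = (fun t => (sg s i, sg s t)) ∘ (fun d : Int => d + i) := by
        funext d
        simp only [Function.comp_apply]
        rw [add_comm]
      rw [hcomp, ← List.map_map, pyRange_map_add]
      unfold Rc
      congr 2 <;> omega
    rw [hL, hR, List.append_assoc]

-- ===== VERDICT =====
theorem create_skipgrams_spec : Claim_equal_create_skipgrams := by
  intro sentence window_size _
  unfold Spec_create_skipgrams
  rw [A_eq_canon, B_eq_canon]
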